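-- pv_equiv track=rewrite | github.com/Mr-Aniket-Gupta/ISS | All.py | RailFence
-- ===== SOURCE A (Python) =====
-- def RailFence(txt):
--     result = ""
--     for i in range(len(txt)):
--         if i % 2 == 0:
--             result += txt[i]
--
--     for i in range(len(txt)):
--         if i % 2 != 0:
--             result += txt[i]
--     return result
-- ===== SOURCE B (Python) =====
-- def RailFence(txt):
--     return txt[::2] + txt[1::2]
-- ===== Notes on version B (the rewrite author's own statement) =====
-- stated objective: idiomatic
-- what changed: Replaced the two index loops with modulo tests and character-by-character string concatenation by direct stride slicing txt[::2] + txt[1::2].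
import Mathlib
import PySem

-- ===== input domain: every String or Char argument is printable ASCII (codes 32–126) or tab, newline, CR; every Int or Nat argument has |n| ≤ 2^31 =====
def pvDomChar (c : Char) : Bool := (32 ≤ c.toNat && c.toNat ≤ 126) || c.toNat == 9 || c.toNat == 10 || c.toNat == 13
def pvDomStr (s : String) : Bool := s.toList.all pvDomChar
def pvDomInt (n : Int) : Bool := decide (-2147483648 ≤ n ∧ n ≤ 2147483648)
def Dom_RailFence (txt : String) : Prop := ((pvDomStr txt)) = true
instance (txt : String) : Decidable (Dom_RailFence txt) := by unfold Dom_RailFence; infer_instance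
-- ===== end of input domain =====

-- B replaces A's two modulo-filtered index loops (char-by-char += accumulation) by direct stride slicing txt[::2] + txt[1::2] (more idiomatic).

-- ===== PORT A =====
-- two passes over range(len(txt)): even indices appended first, then odd indices; result accumulated char by char
def RailFence (txt : String) : String :=
  let cs := txt.toList
  let result : List Char := []
  let result := (PySem.List.pyRange 0 (PySem.Str.len txt) 1).foldl
    (fun acc i => if PySem.Int.mod i 2 = 0 then acc ++ [PySem.List.pyGetD cs i ' '] else acc) result
  let result := (PySem.List.pyRange 0 (PySem.Str.len txt) 1).foldl
    (fun acc i => if PySem.Int.mod i 2 ≠ 0 then acc ++ [PySem.List.pyGetD cs i ' '] else acc) result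
  String.ofList result

-- ===== PORT B =====
-- txt[::2] + txt[1::2]; slice? is none only for step 0, so the getD [] default never fires
def RailFence_alt (txt : String) : String :=
  String.ofList (((PySem.List.slice? txt.toList none none 2).getD []) ++
                 ((PySem.List.slice? txt.toList (some 1) none 2).getD []))

-- ===== PRECONDITION & SPEC =====
def Spec_RailFence (txt : String) (out : String) : Prop := out = RailFence_alt txt
instance (txt : String) (out : String) : Decidable (Spec_RailFence txt out) := by unfold Spec_RailFence; infer_instance

-- ===== CLAIM (what is proved, stated in full; the proofs are below) =====
def Claim_equal_RailFence : Prop := ∀ (txt : String), Dom_RailFence txt → Spec_RailFence txt (RailFence txt)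

-- ===== LEMMAS AND PROOFS =====

-- the even positions of range n are 2*k for k < (n+1)/2
lemma range_filter_even (n : Nat) :
    (List.range n).filter (fun k => decide (k % 2 = 0)) =
      (List.range ((n + 1) / 2)).map (fun k => 2 * k) := by
  induction n with
  | zero => simp
  | succ n ih =>
    rw [List.range_succ, List.filter_append, ih]
    rcases Nat.even_or_odd n with ⟨m, hm⟩ | ⟨m, hm⟩
    · have h1 : (n + 1 + 1) / 2 = (n + 1) / 2 + 1 := by omega
      have : (List.filter (fun k => decide (k % 2 = 0)) [n]) = [n] := by
        simp; omega
      rw [h1, this, List.range_succ, List.map_append]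
      simp; omega
    · have h1 : (n + 1 + 1) / 2 = (n + 1) / 2 := by omega
      have : (List.filter (fun k => decide (k % 2 = 0)) [n]) = [] := by
        simp; omega
      rw [h1, this, List.append_nil]

-- the odd positions of range n are 2*k+1 for k < n/2
lemma range_filter_odd (n : Nat) :
    (List.range n).filter (fun k => decide (¬ k % 2 = 0)) =
      (List.range (n / 2)).map (fun k => 2 * k + 1) := by
  induction n with
  | zero => simp
  | succ n ih =>
    rw [List.range_succ, List.filter_append, ih]
    rcases Nat.even_or_odd n with ⟨m, hm⟩ | ⟨m, hm⟩
    · have h1 : (n + 1) / 2 = n / 2 := by omega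
      have : (List.filter (fun k => decide (¬ k % 2 = 0)) [n]) = [] := by
        simp; omega
      rw [h1, this, List.append_nil]
    · have h1 : (n + 1) / 2 = n / 2 + 1 := by omega
      have : (List.filter (fun k => decide (¬ k % 2 = 0)) [n]) = [n] := by
        simp; omega
      rw [h1, this, List.range_succ, List.map_append]
      simp; omega

-- an always-in-range filterMap over getElem? is a map over getD
lemma filterMap_getElem_eq_map (xs : List Char) (c : Nat) (f : Nat → Nat)
    (h : ∀ k, k < c → f k < xs.length) :
    (List.range c).filterMap (fun k => xs[f k]?) =
      (List.range c).map (fun k => xs.getD (f k) ' ') := by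
  rw [← List.filterMap_eq_map]
  apply List.filterMap_congr
  intro k hk
  have hk' : f k < xs.length := h k (List.mem_range.mp hk)
  simp [List.getD_eq_getElem?_getD, List.getElem?_eq_getElem hk']

-- xs[::2] in closed form
lemma slice_even (xs : List Char) :
    (PySem.List.slice? xs none none 2).getD [] =
      (List.range ((xs.length + 1) / 2)).map (fun k => xs.getD (2 * k) ' ') := by
  rw [← filterMap_getElem_eq_map _ _ _ (by omega)]
  simp only [PySem.List.slice?, PySem.List.sliceIndices]
  norm_num
  have h1 : ∀ x : Nat, ((2:Int) * ↑x).toNat = 2 * x := by intro x; omega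
  have h2 : (if 0 < xs.length then (((xs.length:Int) + 2 - 1) / 2).toNat else 0) =
      (xs.length + 1) / 2 := by split_ifs <;> omega
  simp only [h1, h2]

-- xs[1::2] in closed form
lemma slice_odd (xs : List Char) :
    (PySem.List.slice? xs (some 1) none 2).getD [] =
      (List.range (xs.length / 2)).map (fun k => xs.getD (2 * k + 1) ' ') := by
  rw [← filterMap_getElem_eq_map _ _ _ (by omega)]
  simp only [PySem.List.slice?, PySem.List.sliceIndices]
  norm_num
  rcases Nat.eq_zero_or_pos xs.length with h0 | h0
  · simp [h0]
  · have hm : min 1 (xs.length : Int) = 1 := by omega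
    have h1 : ∀ x : Nat, ((1:Int) + 2 * ↑x).toNat = 2 * x + 1 := by intro x; omega
    have h2 : (if 1 < xs.length then (((xs.length:Int) - 1 + 2 - 1) / 2).toNat else 0) =
        xs.length / 2 := by split_ifs <;> omega
    simp only [hm, h1, h2]

-- ===== VERDICT (by name: the statement is the Claim_ definition above) =====
theorem RailFence_spec : Claim_equal_RailFence := by
  intro txt _
  unfold Spec_RailFence RailFence RailFence_alt
  rw [slice_even, slice_odd]
  apply congrArg String.ofList
  rw [PySem.Str.len_eq, PySem.List.pyRange_zero_natCast, List.foldl_map, List.foldl_map]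
  have hfunE : (fun (acc : List Char) (k : Nat) =>
      if PySem.Int.mod (k:Int) 2 = 0 then acc ++ [PySem.List.pyGetD txt.toList (k:Int) ' '] else acc)
      = fun acc k => if (fun k : Nat => decide (k % 2 = 0)) k = true
          then acc ++ [(fun k => txt.toList.getD k ' ') k] else acc := by
    funext acc k
    simp [PySem.List.pyGetD_natCast]
    exact if_congr (by omega) rfl rfl
  have hfunO : (fun (acc : List Char) (k : Nat) =>
      if PySem.Int.mod (k:Int) 2 ≠ 0 then acc ++ [PySem.List.pyGetD txt.toList (k:Int) ' '] else acc)
      = fun acc k => if (fun k : Nat => decide (¬ k % 2 = 0)) k = true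
          then acc ++ [(fun k => txt.toList.getD k ' ') k] else acc := by
    funext acc k
    simp [PySem.List.pyGetD_natCast]
    exact if_congr (by omega) rfl rfl
  rw [hfunE, hfunO, PySem.List.foldl_append_if, PySem.List.foldl_append_if,
      range_filter_even, range_filter_odd, List.map_map, List.map_map]
  simp [Function.comp_def]
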